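-- pv_equiv track=rewrite | github.com/qn06142/coding-python | oddfunc.py | solve
-- ===== SOURCE A (Python) =====
-- MOD = 10**9 + 7
--
-- def gcd(x, y):
--     while y:
--         x, y = y, x % y
--     return x
--
-- def lcm(x, y):
--     return x // gcd(x, y) * y
--
-- def solve(t, test_cases):
--     results = []
--     for n in test_cases:
--         G = 1
--         ans = 0
--         i = 1
--         while G <= n:
--             G = lcm(G, i)
--             if G > n:
--                 break
--             ans += n // G
--             i += 1
--         results.append((ans + n) % MOD)
--     return results
-- ===== SOURCE B (Python) =====
-- MOD = 10**9 + 7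
--
-- def solve(t, test_cases):
--     if not test_cases:
--         return []
--     top = max(test_cases)
--     acc = [0] * len(test_cases)
--     g, k = 1, 1
--     while True:
--         # advance g to lcm(1..k): the smallest positive multiple of g divisible by k
--         for m in range(1, k + 1):
--             if (g * m) % k == 0:
--                 g *= m
--                 break
--         if g > top:
--             break
--         for j, n in enumerate(test_cases):
--             if g <= n:
--                 acc[j] += n // g
--         k += 1
--     return [(a + n) % MOD for a, n in zip(acc, test_cases)]
-- ===== Notes on version B (the rewrite author's own statement) =====
-- stated objective: alternative
-- what changed: B inverts the loop nesting: a single shared pass over the lcm(1..k) ladder updates an accumulator per test case at each step, and each lcm is found by searching multiples of the running value (no gcd at all), instead of A's per-test-case while loop recomputing Euclid's gcd.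
import Mathlib
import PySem

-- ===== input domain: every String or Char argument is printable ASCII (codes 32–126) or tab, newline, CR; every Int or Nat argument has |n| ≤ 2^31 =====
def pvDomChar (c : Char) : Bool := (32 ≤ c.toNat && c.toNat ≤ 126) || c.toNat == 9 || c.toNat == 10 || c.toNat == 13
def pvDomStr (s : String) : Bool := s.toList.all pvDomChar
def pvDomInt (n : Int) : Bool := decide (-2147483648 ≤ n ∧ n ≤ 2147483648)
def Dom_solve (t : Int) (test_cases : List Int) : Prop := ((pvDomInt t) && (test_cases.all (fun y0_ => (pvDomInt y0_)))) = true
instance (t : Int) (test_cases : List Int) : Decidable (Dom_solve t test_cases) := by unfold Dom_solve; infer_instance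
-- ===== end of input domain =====

-- B transposes the computation: one shared pass over the lcm(1..k) ladder updating an
-- accumulator per test case (each lcm found by searching multiples, with no gcd at all),
-- instead of A's per-test-case while loop with Euclid's gcd: objective "alternative".

-- ===== PORT A =====
-- Python `gcd`: `while y: x, y = y, x % y`; fuel only makes the loop total, the
-- computation is step-for-step Python's (PySem.Int.mod is Python's %).
def gcdLoop (fuel : Nat) (x y : Int) : Int :=
  match fuel with
  | 0 => x
  | f + 1 => if y = 0 then x else gcdLoop f y (PySem.Int.mod x y)

def pyGcd (x y : Int) : Int := gcdLoop (y.natAbs + 1) x y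

-- Python `lcm`: x // gcd(x, y) * y
def pyLcm (x y : Int) : Int := PySem.Int.floordiv x (pyGcd x y) * y

-- A's inner while loop; fuel n.toNat+1 suffices (the loop stops once the lcm exceeds n,
-- and after k steps the lcm is ≥ k); it only makes the recursion total.
def solveLoop (fuel : Nat) (n G ans i : Int) : Int :=
  match fuel with
  | 0 => ans
  | f + 1 =>
    if G ≤ n then
      let G' := pyLcm G i
      if G' > n then ans
      else solveLoop f n G' (ans + PySem.Int.floordiv n G') (i + 1)
    else ans

def solve (t : Int) (test_cases : List Int) : List Int :=
  test_cases.map (fun n => PySem.Int.mod (solveLoop (n.toNat + 1) n 1 0 1 + n) 1000000007)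

-- ===== PORT B =====
-- Source B's inner `for m in range(1, k+1): if (g*m) % k == 0: g *= m; break`
def searchLoop (g k : Int) : List Int → Int
  | [] => g
  | m :: rest => if PySem.Int.mod (g * m) k = 0 then g * m else searchLoop g k rest

def searchLcm (g k : Int) : Int := searchLoop g k (PySem.List.pyRange 1 (k + 1) 1)

-- one ladder step applied to the whole accumulator vector (acc_j paired with its n_j)
def bStep (g : Int) (st : List (Int × Int)) : List (Int × Int) :=
  st.map (fun p => if g ≤ p.2 then (p.1 + PySem.Int.floordiv p.2 g, p.2) else p)

-- Source B's `while True` loop; fuel top.toNat+1 suffices (after k steps g ≥ k), it only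
-- makes the recursion total.
def bLoop (fuel : Nat) (g k top : Int) (st : List (Int × Int)) : List (Int × Int) :=
  match fuel with
  | 0 => st
  | f + 1 =>
    let g' := searchLcm g k
    if g' > top then st
    else bLoop f g' (k + 1) top (bStep g' st)

def solve_alt (t : Int) (test_cases : List Int) : List Int :=
  match PySem.List.max? test_cases (fun x => x) with
  | none => []
  | some top =>
    (bLoop (top.toNat + 1) 1 1 top (test_cases.map (fun n => (0, n)))).map
      (fun p => PySem.Int.mod (p.1 + p.2) 1000000007)

-- ===== PRECONDITION & SPEC =====
def Spec_solve (t : Int) (test_cases : List Int) (out : List Int) : Prop := out = solve_alt t test_cases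
instance (t : Int) (test_cases : List Int) (out : List Int) : Decidable (Spec_solve t test_cases out) := by unfold Spec_solve; infer_instance

-- ===== CLAIM (what is proved, stated in full; the proofs are below) =====
def Claim_equal_solve : Prop := ∀ (t : Int) (test_cases : List Int), Dom_solve t test_cases → Spec_solve t test_cases (solve t test_cases)

-- ===== LEMMAS AND PROOFS =====

-- gcdLoop computes a positive common divisor of nonneg arguments that every common
-- divisor divides (given enough fuel): it is THE gcd in the divisibility order
theorem gcdLoop_spec : ∀ (f : Nat) (x y : Int), y.natAbs < f → 0 ≤ y → 0 < x →
    0 < gcdLoop f x y ∧ gcdLoop f x y ∣ x ∧ gcdLoop f x y ∣ y ∧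
      (∀ c : Int, c ∣ x → c ∣ y → c ∣ gcdLoop f x y) := by
  intro f
  induction f with
  | zero => intro x y h; omega
  | succ f ih =>
    intro x y hf hy hx
    unfold gcdLoop
    by_cases h0 : y = 0
    · simp [h0, hx]
    · have hypos : 0 < y := lt_of_le_of_ne hy (Ne.symm h0)
      have hm0 : 0 ≤ PySem.Int.mod x y := PySem.Int.mod_nonneg x hypos
      have hmlt : PySem.Int.mod x y < y := PySem.Int.mod_lt x hypos
      have hx' : PySem.Int.floordiv x y * y + PySem.Int.mod x y = x :=
        PySem.Int.floordiv_mul_add_mod x y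
      obtain ⟨hpos, hdy, hdm, hgr⟩ := ih y (PySem.Int.mod x y) (by omega) hm0 hypos
      simp only [h0, if_false]
      refine ⟨hpos, ?_, hdy, ?_⟩
      · have hsum : gcdLoop f y (PySem.Int.mod x y) ∣ PySem.Int.floordiv x y * y + PySem.Int.mod x y :=
          dvd_add (Dvd.dvd.mul_left hdy _) hdm
        simpa [hx'] using hsum
      · intro c hcx hcy
        apply hgr c hcy
        have : c ∣ x - PySem.Int.floordiv x y * y := dvd_sub hcx (Dvd.dvd.mul_left hcy _)
        have hxm : x - PySem.Int.floordiv x y * y = PySem.Int.mod x y := by omega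
        rwa [hxm] at this

theorem pyGcd_spec (x y : Int) (hx : 0 < x) (hy : 0 ≤ y) :
    0 < pyGcd x y ∧ pyGcd x y ∣ x ∧ pyGcd x y ∣ y ∧
      (∀ c : Int, c ∣ x → c ∣ y → c ∣ pyGcd x y) :=
  gcdLoop_spec (y.natAbs + 1) x y (by omega) hy hx

-- the lcm of two positive ints is at least each of them
theorem pyLcm_lb (g k : Int) (hg : 1 ≤ g) (hk : 1 ≤ k) :
    g ≤ pyLcm g k ∧ k ≤ pyLcm g k := by
  obtain ⟨hd, hdg, hdk, -⟩ := pyGcd_spec g k (by omega) (by omega)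
  set d := pyGcd g k with hdd
  obtain ⟨q, hq⟩ := hdg
  have hq1 : 1 ≤ q := by
    by_contra h
    have h' : q ≤ 0 := by omega
    nlinarith
  have hfd : PySem.Int.floordiv g d = q := by
    rw [PySem.Int.floordiv_eq_ediv_of_pos hd, hq, Int.mul_ediv_cancel_left q (by omega)]
  have hdlek : d ≤ k := Int.le_of_dvd (by omega) hdk
  constructor
  · calc g = d * q := hq
      _ ≤ k * q := by nlinarith
      _ = pyLcm g k := by rw [pyLcm, hfd]; ring
  · calc k = 1 * k := (one_mul k).symm
      _ ≤ q * k := by nlinarith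
      _ = pyLcm g k := by rw [pyLcm, hfd]

-- the key quantity behind both programs: pyLcm g k = g * (k / gcd), and k divides
-- g * m exactly for the multiples m of k / gcd
theorem lcm_structure (g k : Int) (hg : 1 ≤ g) (hk : 1 ≤ k) :
    ∃ b : Int, 1 ≤ b ∧ b ≤ k ∧ pyLcm g k = g * b ∧ (∀ m : Int, k ∣ g * m ↔ b ∣ m) := by
  obtain ⟨hd, hdg, hdk, hgr⟩ := pyGcd_spec g k (by omega) (by omega)
  set d := pyGcd g k with hdd
  obtain ⟨a, ha⟩ := hdg
  obtain ⟨b, hb⟩ := hdk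
  have hb1 : 1 ≤ b := by nlinarith [mul_pos hd (lt_of_lt_of_le (by omega : (0:Int) < 1) (le_refl 1))]
  have ha1 : 1 ≤ a := by nlinarith
  have hblek : b ≤ k := by nlinarith
  -- a and b are coprime: d * gcd(a,b) is a common divisor of g and k, hence divides d
  have hcop : Int.gcd a b = 1 := by
    set e : Int := (Int.gcd a b : Int) with he
    have hea : e ∣ a := by rw [he]; exact Int.gcd_dvd_left a b
    have heb : e ∣ b := by rw [he]; exact Int.gcd_dvd_right a b
    have h1 : d * e ∣ g := by rw [ha]; exact mul_dvd_mul_left d hea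
    have h2 : d * e ∣ k := by rw [hb]; exact mul_dvd_mul_left d heb
    have h3 : d * e ∣ d := hgr (d * e) h1 h2
    have h4 : e ∣ 1 := (mul_dvd_mul_iff_left (by omega : d ≠ 0)).mp (by simpa using h3)
    have h5 : e.natAbs ∣ 1 := Int.natAbs_dvd_natAbs.mpr h4
    have h6 : e.natAbs = 1 := Nat.eq_one_of_dvd_one h5
    have : (0:Int) ≤ e := Int.natCast_nonneg _
    omega
  refine ⟨b, hb1, hblek, ?_, ?_⟩
  · have hfd : PySem.Int.floordiv g d = a := by
      rw [PySem.Int.floordiv_eq_ediv_of_pos hd, ha, Int.mul_ediv_cancel_left a (by omega)]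
    rw [pyLcm, ← hdd, hfd, hb, ha]
    ring
  · intro m
    constructor
    · intro hdvd
      rw [ha, hb] at hdvd
      have h1 : b ∣ a * m := (mul_dvd_mul_iff_left (by omega : d ≠ 0)).mp (by
        have : d * a * m = d * (a * m) := by ring
        rwa [this] at hdvd)
      have hcop' : Int.gcd b a = 1 := by rw [Int.gcd_comm]; exact hcop
      exact Int.dvd_of_dvd_mul_left_of_gcd_one (by rwa [mul_comm] at h1) hcop'
    · rintro ⟨c, rfl⟩
      have : g * (b * c) = (g * b) * c := by ring
      rw [this]
      apply Dvd.dvd.mul_right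
      rw [ha, hb]
      exact ⟨a, by ring⟩

-- Source B's multiple search over range(1, k+1) stops exactly at m = b = k / gcd
theorem searchLoop_range (g k b : Int) (hb : 1 ≤ b) (hbk : b ≤ k)
    (hdvd : ∀ m : Int, k ∣ g * m ↔ b ∣ m) :
    ∀ (c : Nat) (j : Int), 1 ≤ j → j ≤ b → (b - j).toNat ≤ c →
      searchLoop g k (PySem.List.pyRange j (k + 1) 1) = g * b := by
  intro c
  induction c with
  | zero =>
    intro j hj1 hjb hc
    have hjb' : j = b := by omega
    subst hjb'
    rw [PySem.List.pyRange_one_cons (by omega)]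
    unfold searchLoop
    have : k ∣ g * j := (hdvd j).mpr dvd_rfl
    rw [(PySem.Int.mod_eq_zero_iff_dvd _ _).mpr this]
    simp
  | succ c ih =>
    intro j hj1 hjb hc
    by_cases hj : j = b
    · subst hj
      rw [PySem.List.pyRange_one_cons (by omega)]
      unfold searchLoop
      have : k ∣ g * j := (hdvd j).mpr dvd_rfl
      rw [(PySem.Int.mod_eq_zero_iff_dvd _ _).mpr this]
      simp
    · have hjlt : j < b := lt_of_le_of_ne hjb hj
      rw [PySem.List.pyRange_one_cons (by omega)]
      unfold searchLoop
      have hnd : ¬ k ∣ g * j := by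
        rw [hdvd j]
        intro h
        have := Int.le_of_dvd (by omega) h
        omega
      have hm : ¬ PySem.Int.mod (g * j) k = 0 := by
        rw [PySem.Int.mod_eq_zero_iff_dvd]
        exact hnd
      rw [if_neg hm]
      exact ih (j + 1) (by omega) (by omega) (by omega)

-- hence B's gcd-free lcm step agrees with A's Euclid-based one
theorem searchLcm_eq (g k : Int) (hg : 1 ≤ g) (hk : 1 ≤ k) : searchLcm g k = pyLcm g k := by
  obtain ⟨b, hb1, hbk, hlcm, hdvd⟩ := lcm_structure g k hg hk
  rw [searchLcm, searchLoop_range g k b hb1 hbk hdvd (b - 1).toNat 1 (by omega) hb1 (by omega), hlcm]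

-- the abstract lcm(1..i) chain, bounded by n, truncated at `fuel` steps
def seqF (fuel : Nat) (g k n : Int) : List Int :=
  match fuel with
  | 0 => []
  | f + 1 =>
    let g' := pyLcm g k
    if g' ≤ n then g' :: seqF f g' (k + 1) n else []

def sumDiv (n : Int) : List Int → Int
  | [] => 0
  | d :: l => PySem.Int.floordiv n d + sumDiv n l

-- A's loop adds up n // lcm(1..j) along the chain
theorem loop_char (n : Int) : ∀ (f : Nat) (g ans i : Int), 1 ≤ g → 1 ≤ i →
    solveLoop f n g ans i = ans + sumDiv n (seqF f g i n) := by
  intro f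
  induction f with
  | zero => intro g ans i _ _; simp [solveLoop, seqF, sumDiv]
  | succ f ih =>
    intro g ans i hg hi
    obtain ⟨hgl, hil⟩ := pyLcm_lb g i hg hi
    unfold solveLoop seqF
    by_cases hgn : g ≤ n
    · simp only [hgn, if_true]
      by_cases hbig : pyLcm g i > n
      · simp [hbig, not_le.mpr hbig, sumDiv]
      · have hle : pyLcm g i ≤ n := not_lt.mp hbig
        simp only [hbig, if_false, hle, if_true]
        rw [ih (pyLcm g i) _ (i + 1) (by omega) (by omega)]
        simp [sumDiv]
        ring
    · have : ¬ pyLcm g i ≤ n := by omega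
      simp [hgn, this, sumDiv]

-- every chain element is at least the seed g
theorem seq_lb : ∀ (f : Nat) (g k M x : Int), 1 ≤ g → 1 ≤ k →
    x ∈ seqF f g k M → g ≤ x := by
  intro f
  induction f with
  | zero => intro g k M x _ _ h; simp [seqF] at h
  | succ f ih =>
    intro g k M x hg hk hx
    obtain ⟨hgl, hkl⟩ := pyLcm_lb g k hg hk
    unfold seqF at hx
    by_cases hgM : pyLcm g k ≤ M
    · simp only [hgM, if_true, List.mem_cons] at hx
      rcases hx with rfl | hx
      · exact hgl
      · exact le_trans hgl (ih (pyLcm g k) (k + 1) M x (by omega) (by omega) hx)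
    · simp [hgM] at hx

-- filtering the chain built up to M by ≤ n (n ≤ M) = building it up to n
theorem filter_seq (n M : Int) (hnM : n ≤ M) : ∀ (f : Nat) (g k : Int), 1 ≤ g → 1 ≤ k →
    (seqF f g k M).filter (fun d => decide (d ≤ n)) = seqF f g k n := by
  intro f
  induction f with
  | zero => intro g k _ _; simp [seqF]
  | succ f ih =>
    intro g k hg hk
    obtain ⟨hgl, hkl⟩ := pyLcm_lb g k hg hk
    unfold seqF
    by_cases hgn : pyLcm g k ≤ n
    · have hgM : pyLcm g k ≤ M := le_trans hgn hnM
      simp only [hgM, if_true, hgn, List.filter_cons, decide_true, if_true]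
      rw [ih (pyLcm g k) (k + 1) (by omega) (by omega)]
    · by_cases hgM : pyLcm g k ≤ M
      · have hempty : List.filter (fun d => decide (d ≤ n)) (seqF f (pyLcm g k) (k + 1) M) = [] := by
          apply List.filter_eq_nil_iff.mpr
          intro x hx
          have := seq_lb f (pyLcm g k) (k + 1) M x (by omega) (by omega) hx
          simp
          omega
        simp [hgM, hgn, hempty]
      · simp [hgM, hgn]

-- B's transposed loop: each accumulator receives the filtered chain sum of its own n
theorem bLoop_char : ∀ (f : Nat) (g k top : Int) (st : List (Int × Int)), 1 ≤ g → 1 ≤ k →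
    bLoop f g k top st =
      st.map (fun p => (p.1 + sumDiv p.2 ((seqF f g k top).filter (fun d => decide (d ≤ p.2))), p.2)) := by
  intro f
  induction f with
  | zero =>
    intro g k top st _ _
    simp [bLoop, seqF, sumDiv]
  | succ f ih =>
    intro g k top st hg hk
    obtain ⟨hgl, hkl⟩ := pyLcm_lb g k hg hk
    unfold bLoop seqF
    rw [searchLcm_eq g k hg hk]
    by_cases htop : pyLcm g k > top
    · simp only [htop, if_true, not_le.mpr htop, if_false]
      simp [sumDiv]
    · have hle : pyLcm g k ≤ top := not_lt.mp htop
      simp only [htop, if_false, hle, if_true]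
      rw [ih (pyLcm g k) (k + 1) top (bStep (pyLcm g k) st) (by omega) (by omega)]
      unfold bStep
      rw [List.map_map]
      apply List.map_congr_left
      intro p _
      simp only [Function.comp]
      by_cases hpn : pyLcm g k ≤ p.2
      · simp [hpn, sumDiv]
        ring
      · simp [hpn]

-- past the fuel bound (n+1-k), the chain no longer depends on the fuel
theorem seq_nil_of_gt (f : Nat) (g k n : Int) (hg : 1 ≤ g) (hk : 1 ≤ k) (h : n < k) :
    seqF f g k n = [] := by
  cases f with
  | zero => rfl
  | succ f =>
    obtain ⟨_, hkl⟩ := pyLcm_lb g k hg hk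
    unfold seqF
    have : ¬ pyLcm g k ≤ n := by omega
    simp [this]

theorem seq_stable (n : Int) : ∀ (b f f' : Nat) (g k : Int), 1 ≤ g → 1 ≤ k →
    (n + 1 - k).toNat ≤ b → b ≤ f → b ≤ f' → seqF f g k n = seqF f' g k n := by
  intro b
  induction b with
  | zero =>
    intro f f' g k hg hk hb _ _
    have hnk : n < k := by omega
    rw [seq_nil_of_gt f g k n hg hk hnk, seq_nil_of_gt f' g k n hg hk hnk]
  | succ b ih =>
    intro f f' g k hg hk hb hf hf'
    obtain ⟨f₁, rfl⟩ : ∃ f₁, f = f₁ + 1 := ⟨f - 1, by omega⟩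
    obtain ⟨f₁', rfl⟩ : ∃ f₁', f' = f₁' + 1 := ⟨f' - 1, by omega⟩
    unfold seqF
    by_cases h : pyLcm g k ≤ n
    · simp only [h, if_true]
      obtain ⟨hgl, hkl⟩ := pyLcm_lb g k hg hk
      rw [ih f₁ f₁' (pyLcm g k) (k + 1) (by omega) (by omega) (by omega) (by omega) (by omega)]
    · simp [h]

-- ===== VERDICT (by name: the statement is the Claim_ definition above) =====
theorem solve_spec : Claim_equal_solve := by
  intro t tc _
  unfold Spec_solve solve solve_alt
  cases hmax : PySem.List.max? tc (fun x => x) with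
  | none =>
    have : tc = [] := (PySem.List.max?_eq_none_iff tc (fun x => x)).mp hmax
    simp [this]
  | some M =>
    simp only []
    rw [bLoop_char (M.toNat + 1) 1 1 M _ (by omega) (by omega), List.map_map, List.map_map]
    apply List.map_congr_left
    intro n hn
    have hnM : n ≤ M := PySem.List.max?_isMax hmax n hn
    simp only [Function.comp]
    congr 1
    rw [loop_char n (n.toNat + 1) 1 0 1 (by omega) (by omega)]
    rw [filter_seq n M hnM (M.toNat + 1) 1 1 (by omega) (by omega)]
    rw [seq_stable n n.toNat (M.toNat + 1) (n.toNat + 1) 1 1 (by omega) (by omega)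
        (by omega) (by omega) (by omega)]
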